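-- pv_equiv track=rewrite | github.com/maxpareschi/msgspec-settings | msgspec_settings/sources/dotenv.py | _find_closing_quote
-- ===== SOURCE A (Python) =====
-- def _find_closing_quote(value: str, quote: str) -> int:
--     """Find the first non-escaped closing quote in a quoted value.
--
--     Args:
--         value: Candidate value including opening quote.
--         quote: Quote character to match (``"`` or ``'``).
--
--     Returns:
--         Index of the closing quote, or ``-1`` when not found.
--     """
--     escaped = False
--     for idx in range(1, len(value)):
--         char = value[idx]
--         if escaped:
--             escaped = False
--             continue
--         if char == "\\":
--             escaped = True
--             continue
--         if char == quote:
--             return idx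
--     return -1
-- ===== SOURCE B (Python) =====
-- def _find_closing_quote(value: str, quote: str) -> int:
--     """Find the first non-escaped closing quote in a quoted value.
--
--     Jump-to-candidate search: instead of a per-character escape-flag state
--     machine, find each occurrence of the quote and decide locally whether it
--     is escaped by the parity of the backslash run immediately before it.
--     """
--     if len(quote) != 1 or quote == "\\":
--         # Only a single, non-backslash character can ever match a closing quote.
--         return -1
--     start = 1
--     while True:
--         pos = value.find(quote, start)
--         if pos == -1:
--             return -1
--         k = pos - 1
--         while k >= 1 and value[k] == "\\":
--             k -= 1
--         if (pos - 1 - k) % 2 == 0: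
--             return pos
--         start = pos + 1
-- ===== Notes on version B (the rewrite author's own statement) =====
-- stated objective: faster
-- what changed: Replaces the per-character escape-flag state machine with a jump-to-candidate scan: repeatedly str.find the quote and accept it iff the run of backslashes immediately before it (not reaching below index 1) has even length; degenerate quote arguments (multi-char, empty, or backslash) can never match and return -1 directly.
import Mathlib
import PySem

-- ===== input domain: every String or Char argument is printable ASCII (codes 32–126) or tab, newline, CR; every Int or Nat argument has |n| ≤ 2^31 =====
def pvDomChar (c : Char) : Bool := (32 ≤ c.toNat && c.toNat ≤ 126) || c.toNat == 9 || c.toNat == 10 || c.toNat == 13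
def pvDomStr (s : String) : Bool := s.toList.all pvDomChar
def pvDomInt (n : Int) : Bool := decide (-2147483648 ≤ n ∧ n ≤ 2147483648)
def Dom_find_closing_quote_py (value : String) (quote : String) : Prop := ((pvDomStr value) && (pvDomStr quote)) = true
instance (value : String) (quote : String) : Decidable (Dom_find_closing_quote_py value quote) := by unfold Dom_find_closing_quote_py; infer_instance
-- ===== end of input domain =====

-- B replaces A's per-character escape-flag state machine with a find-the-next-quote jump plus a
-- local backslash-run parity test; return values are equal on all inputs.

-- ===== PORT A =====
-- for idx in range(1, len(value)): char = value[idx]; … — recursion over the chars after index 0,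
-- carrying the running index and the escape flag.  `char == quote` is 1-char-string equality,
-- ported as list equality `quote.toList = [c]`.
def pvLoopA (quote : String) : List Char → Nat → Bool → Int
  | [], _, _ => -1
  | c :: rest, idx, escaped =>
    if escaped then pvLoopA quote rest (idx + 1) false
    else if c = '\\' then pvLoopA quote rest (idx + 1) true
    else if quote.toList = [c] then (idx : Int)
    else pvLoopA quote rest (idx + 1) escaped

def find_closing_quote_py (value : String) (quote : String) : Int :=
  pvLoopA quote (value.toList.drop 1) 1 false

-- ===== PORT B =====
-- inner `while k >= 1 and value[k] == "\\": k -= 1`, started at k = pos - 1 (Nat, so 0 at pos ≤ 1)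
def pvBack (l : List Char) : Nat → Nat
  | 0 => 0
  | k + 1 => if l.getD (k + 1) ' ' = '\\' then pvBack l k else k + 1

-- outer `while True:` loop with cursor `start`; `value.find(quote, start)` is PySem.Chars.findFrom;
-- `pos` is inlined as `(… findFrom …).toNat` in the two places it is used after the -1 test.
-- The loop advances the cursor each round, so `value_length + 1 - start` fuel is never exhausted
-- (the equivalence lemmas below prove this); fuel 0 returns the loop's own not-found value.
def pvLoopB (l : List Char) (quote : List Char) : Nat → Nat → Int
  | _, 0 => -1
  | start, fuel + 1 =>
    if PySem.Chars.findFrom l quote (start : Int) none = -1 then -1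
    else
      if ((PySem.Chars.findFrom l quote (start : Int) none).toNat - 1
            - pvBack l ((PySem.Chars.findFrom l quote (start : Int) none).toNat - 1)) % 2 = 0 then
        ((PySem.Chars.findFrom l quote (start : Int) none).toNat : Int)
      else pvLoopB l quote ((PySem.Chars.findFrom l quote (start : Int) none).toNat + 1) fuel

def find_closing_quote_py_alt (value : String) (quote : String) : Int :=
  -- `if len(quote) != 1 or quote == "\\": return -1`
  if quote.toList.length ≠ 1 ∨ quote = "\\" then -1
  else pvLoopB value.toList quote.toList 1 (value.toList.length + 1)

-- ===== PRECONDITION & SPEC =====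
def Spec_find_closing_quote_py (value : String) (quote : String) (out : Int) : Prop := out = find_closing_quote_py_alt value quote
instance (value : String) (quote : String) (out : Int) : Decidable (Spec_find_closing_quote_py value quote out) := by unfold Spec_find_closing_quote_py; infer_instance

-- ===== CLAIM (what is proved, stated in full; the proofs are below) =====
def Claim_equal_find_closing_quote_py : Prop := ∀ (value : String) (quote : String), Dom_find_closing_quote_py value quote → Spec_find_closing_quote_py value quote (find_closing_quote_py value quote)

-- ===== LEMMAS AND PROOFS =====

-- length of the backslash run ending at index k (never reaching below index 1)
def pvBS (l : List Char) : Nat → Nat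
  | 0 => 0
  | k + 1 => if l.getD (k + 1) ' ' = '\\' then pvBS l k + 1 else 0

theorem pvBack_le (l : List Char) (k : Nat) : pvBack l k ≤ k := by
  induction k with
  | zero => simp [pvBack]
  | succ k ih => unfold pvBack; split <;> omega

theorem pvBack_cnt (l : List Char) (k : Nat) : k - pvBack l k = pvBS l k := by
  induction k with
  | zero => simp [pvBack, pvBS]
  | succ k ih =>
    have := pvBack_le l k
    unfold pvBack pvBS
    split <;> omega

-- the common specification: first index j ≥ i holding an unescaped quote character, else -1
def pvFirst (l : List Char) (q : Char) (i : Nat) : Int :=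
  if h : i < l.length then
    (if l.getD i ' ' = q ∧ pvBS l (i - 1) % 2 = 0 then (i : Int) else pvFirst l q (i + 1))
  else -1
termination_by l.length - i

theorem pvFirst_stop (l : List Char) (q : Char) (i : Nat) (hi : ¬ i < l.length) :
    pvFirst l q i = -1 := by
  unfold pvFirst; rw [dif_neg hi]

theorem pvFirst_ok (l : List Char) (q : Char) (i : Nat) (hi : i < l.length)
    (h1 : l.getD i ' ' = q) (h2 : pvBS l (i - 1) % 2 = 0) : pvFirst l q i = (i : Int) := by
  unfold pvFirst; rw [dif_pos hi, if_pos ⟨h1, h2⟩]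

theorem pvFirst_step (l : List Char) (q : Char) (i : Nat) (hi : i < l.length)
    (h : ¬ (l.getD i ' ' = q ∧ pvBS l (i - 1) % 2 = 0)) :
    pvFirst l q i = pvFirst l q (i + 1) := by
  conv_lhs => rw [pvFirst]
  rw [dif_pos hi, if_neg h]

theorem pvFirst_none (l : List Char) (q : Char) (i : Nat)
    (h : ∀ j, i ≤ j → j < l.length → l.getD j ' ' ≠ q) : pvFirst l q i = -1 := by
  by_cases hi : i < l.length
  · rw [pvFirst_step l q i hi (by intro ⟨h1, _⟩; exact h i le_rfl hi h1)]
    exact pvFirst_none l q (i + 1) (fun j hj hjl => h j (by omega) hjl)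
  · exact pvFirst_stop l q i hi
termination_by l.length - i

theorem pvFirst_congr (l : List Char) (q : Char) (i m : Nat) (him : i ≤ m)
    (h : ∀ j, i ≤ j → j < m → ¬(l.getD j ' ' = q ∧ pvBS l (j - 1) % 2 = 0)) :
    pvFirst l q i = pvFirst l q m := by
  rcases Nat.eq_or_lt_of_le him with rfl | hlt
  · rfl
  · by_cases hi : i < l.length
    · rw [pvFirst_step l q i hi (h i le_rfl hlt)]
      exact pvFirst_congr l q (i + 1) m (by omega) (fun j hj hjm => h j (by omega) hjm)
    · rw [pvFirst_stop l q i hi, pvFirst_stop l q m (by omega)]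
termination_by m - i

-- pvBS at a successor index, phrased for an arbitrary positive index
theorem pvBS_succ (l : List Char) (i : Nat) (hi : 1 ≤ i) :
    pvBS l i = if l.getD i ' ' = '\\' then pvBS l (i - 1) + 1 else 0 := by
  obtain ⟨k, rfl⟩ : ∃ k, i = k + 1 := ⟨i - 1, by omega⟩
  simp [pvBS]

-- A's escape flag at index i equals the parity of the backslash run ending at i - 1
theorem loopA_eq_first (quote : String) (l : List Char) (q : Char)
    (hq : quote.toList = [q]) (hqb : q ≠ '\\') :
    ∀ i esc, 1 ≤ i → (esc = decide (pvBS l (i - 1) % 2 = 1)) →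
      pvLoopA quote (l.drop i) i esc = pvFirst l q i := by
  intro i esc h1 hesc
  by_cases hi : i < l.length
  · rw [List.drop_eq_getElem_cons hi]
    have hgetD : l.getD i ' ' = l[i] := List.getD_eq_getElem l ' ' hi
    have hbs := pvBS_succ l i h1
    unfold pvLoopA
    by_cases he : esc = true
    · subst he
      rw [if_pos rfl]
      have hodd : pvBS l (i - 1) % 2 = 1 := by simpa using hesc.symm
      have hnext : pvBS l i % 2 = 0 := by rw [hbs]; split <;> omega
      rw [loopA_eq_first quote l q hq hqb (i + 1) false (by omega)
            (by simp only [Nat.add_sub_cancel, hnext]; simp)]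
      rw [pvFirst_step l q i hi (by intro ⟨_, hpar⟩; omega)]
    · have he' : esc = false := by cases esc <;> simp_all
      subst he'
      have heven : pvBS l (i - 1) % 2 = 0 := by
        have := hesc.symm; simp at this; omega
      rw [if_neg (by simp)]
      by_cases hbsl : l[i] = '\\'
      · rw [if_pos hbsl]
        have hnext : pvBS l i % 2 = 1 := by
          rw [hbs, if_pos (hgetD.trans hbsl)]; omega
        rw [loopA_eq_first quote l q hq hqb (i + 1) true (by omega)
              (by simp only [Nat.add_sub_cancel, hnext]; simp)]
        rw [pvFirst_step l q i hi
              (by intro ⟨h1', _⟩; exact hqb (by rw [← h1', hgetD, hbsl]))]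
      · rw [if_neg hbsl]
        by_cases hcq : l[i] = q
        · rw [if_pos (by rw [hq, hcq]), pvFirst_ok l q i hi (hgetD.trans hcq) heven]
        · rw [if_neg (by rw [hq]; intro hc; exact hcq (by injection hc with h _; exact h.symm))]
          have hnext : pvBS l i % 2 = 0 := by
            rw [hbs, if_neg (by rw [hgetD]; exact hbsl)]
          rw [loopA_eq_first quote l q hq hqb (i + 1) false (by omega)
                (by simp only [Nat.add_sub_cancel, hnext]; simp)]
          rw [pvFirst_step l q i hi (by intro ⟨h1', _⟩; exact hcq (hgetD ▸ h1'))]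
  · rw [List.drop_eq_nil_of_le (by omega)]
    unfold pvLoopA
    rw [pvFirst_stop l q i hi]
termination_by i => l.length - i
decreasing_by all_goals omega

-- a one-character list is a prefix of l.drop j iff l holds that character at index j
theorem single_prefix_drop (l : List Char) (q : Char) (j : Nat) :
    [q] <+: l.drop j ↔ (j < l.length ∧ l.getD j ' ' = q) := by
  constructor
  · rintro ⟨t, ht⟩
    have hlen : j < l.length := by
      by_contra h
      rw [List.drop_eq_nil_of_le (by omega)] at ht
      simp at ht
    refine ⟨hlen, ?_⟩
    rw [List.drop_eq_getElem_cons hlen] at ht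
    rw [List.getD_eq_getElem l ' ' hlen]
    injection ht with h _
    exact h.symm
  · rintro ⟨hlen, hc⟩
    rw [List.drop_eq_getElem_cons hlen]
    exact ⟨l.drop (j + 1), by rw [List.getD_eq_getElem l ' ' hlen] at hc; rw [hc]; rfl⟩

theorem loopB_eq_first (l : List Char) (q : Char) :
    ∀ start fuel, 1 ≤ start → start ≤ l.length → l.length + 1 - start ≤ fuel + 1 →
      pvLoopB l [q] start (fuel + 1) = pvFirst l q start := by
  intro start fuel h1 hsl hfuel
  unfold pvLoopB
  by_cases hpos : PySem.Chars.findFrom l [q] (start : Int) none = -1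
  · rw [if_pos hpos]
    rw [PySem.Chars.findFrom_natCast_eq_neg_one_iff l [q] start hsl] at hpos
    refine (pvFirst_none l q start (fun j hj hjl hcq => hpos ?_)).symm
    have hpre : [q] <+: l.drop j := (single_prefix_drop l q j).mpr ⟨hjl, hcq⟩
    have hsfx : l.drop j <:+ l.drop start := by
      have : (l.drop start).drop (j - start) = l.drop j := by
        rw [List.drop_drop]; congr 1; omega
      exact this ▸ List.drop_suffix (j - start) (l.drop start)
    exact hpre.isInfix.trans hsfx.isInfix
  · rw [if_neg hpos]
    obtain ⟨hge, hpre, hmin⟩ := PySem.Chars.findFrom_natCast_spec l [q] start hsl hpos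
    set p := (PySem.Chars.findFrom l [q] (start : Int) none).toNat with hp
    obtain ⟨hplen, hpq⟩ := (single_prefix_drop l q p).mp hpre
    have hstartp : start ≤ p := by
      have h0 : (0 : Int) ≤ PySem.Chars.findFrom l [q] (start : Int) none :=
        le_trans (by exact_mod_cast Nat.zero_le start) hge
      omega
    have hminq : ∀ j, start ≤ j → j < p → l.getD j ' ' ≠ q := by
      intro j hj hjp hcq
      exact hmin j hj hjp ((single_prefix_drop l q j).mpr ⟨by omega, hcq⟩)
    have hcnt := pvBack_cnt l (p - 1)
    by_cases hpar : pvBS l (p - 1) % 2 = 0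
    · rw [if_pos (by omega : (p - 1 - pvBack l (p - 1)) % 2 = 0)]
      rw [pvFirst_congr l q start p hstartp
            (fun j hj hjp ⟨hc, _⟩ => hminq j hj hjp hc)]
      exact (pvFirst_ok l q p hplen hpq hpar).symm
    · rw [if_neg (by omega : ¬ (p - 1 - pvBack l (p - 1)) % 2 = 0)]
      have hstep : pvFirst l q start = pvFirst l q (p + 1) := by
        apply pvFirst_congr l q start (p + 1) (by omega)
        intro j hj hjp ⟨hc, hparity⟩
        rcases Nat.lt_or_ge j p with hlt | hge'
        · exact hminq j hj hlt hc
        · have : j = p := by omega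
          subst this
          exact hpar hparity
      rw [hstep]
      rcases Nat.lt_or_ge (p + 1) (l.length + 1) with hlt | hge'
      · obtain ⟨fuel', rfl⟩ : ∃ f, fuel = f + 1 := ⟨fuel - 1, by omega⟩
        exact loopB_eq_first l q (p + 1) fuel' (by omega) (by omega) (by omega)
      · -- p + 1 = l.length: both sides find nothing beyond the end
        have hplen1 : p + 1 = l.length := by omega
        rw [pvFirst_none l q (p + 1) (fun j hj hjl _ => by omega)]
        obtain ⟨fuel', rfl⟩ : ∃ f, fuel = f + 1 := ⟨fuel - 1, by omega⟩
        have hnone : PySem.Chars.findFrom l [q] ((p + 1 : Nat) : Int) none = -1 := by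
          rw [PySem.Chars.findFrom_natCast_eq_neg_one_iff l [q] (p + 1) (by omega),
              List.drop_eq_nil_of_le (by omega)]
          simp
        unfold pvLoopB
        rw [if_pos hnone]
termination_by _ fuel => fuel

-- A returns -1 whenever quote is not a single non-backslash character
theorem loopA_neg (quote : String) (h : ∀ c : Char, c ≠ '\\' → quote.toList ≠ [c]) :
    ∀ cs idx esc, pvLoopA quote cs idx esc = -1 := by
  intro cs
  induction cs with
  | nil => intro idx esc; rfl
  | cons c rest ih =>
    intro idx esc
    unfold pvLoopA
    split
    · exact ih _ _
    · split
      · exact ih _ _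
      · rename_i hesc hnb
        rw [if_neg (h c (by simpa using hnb)), ih]

-- ===== VERDICT (by name: the statement is the Claim_ definition above) =====
theorem find_closing_quote_py_spec : Claim_equal_find_closing_quote_py := by
  intro value quote _
  unfold Spec_find_closing_quote_py find_closing_quote_py find_closing_quote_py_alt
  by_cases hdeg : quote.toList.length ≠ 1 ∨ quote = "\\"
  · rw [if_pos hdeg]
    apply loopA_neg
    intro c hc hqc
    rcases hdeg with hlen | hbs
    · rw [hqc] at hlen; simp at hlen
    · subst hbs; simp at hqc; exact hc hqc.symm
  · rw [if_neg hdeg]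
    push Not at hdeg
    obtain ⟨hlen, hnbs⟩ := hdeg
    obtain ⟨q, hq⟩ : ∃ q, quote.toList = [q] := by
      cases h : quote.toList with
      | nil => rw [h] at hlen; simp at hlen
      | cons a t =>
        rw [h] at hlen; simp at hlen
        exact ⟨a, by rw [hlen]⟩
    have hqb : q ≠ '\\' := by
      intro hc
      exact hnbs (String.toList_inj.mp (by rw [hq, hc]; rfl))
    rw [hq]
    rcases Nat.eq_zero_or_pos value.toList.length with h0 | hpos
    · -- empty value: both sides return -1 immediately
      have hnil : value.toList = [] := List.length_eq_zero_iff.mp h0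
      rw [hnil]
      simp [pvLoopA, pvLoopB, PySem.Chars.findFrom]
    · rw [loopB_eq_first value.toList q 1 value.toList.length le_rfl hpos (by omega)]
      exact loopA_eq_first quote value.toList q hq hqb 1 false le_rfl (by simp [pvBS])
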